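-- pv_equiv track=rewrite | github.com/phish432/Information-and-Communication-Project | Error-Probability/utils.py | MDD
-- ===== SOURCE A (Python) =====
-- def MDD(code, y):
--     # Pre-calculate hamming distances
--     HDArray = []
--     for codeword in code:
--         HDArray.append(HammingDistance(codeword, y))
--
--     # Finding the minimum hamming distance
--     minHD = min(HDArray)
--
--     # Finding the codewords having minimum hamming distance
--     estimatesArray = []
--     for i in range(len(code)):
--         if HDArray[i] == minHD:
--             estimatesArray.append(code[i])
--
--     return estimatesArray
--
-- def HammingDistance(c1, c2):
--     HD = 0
--     for i in range(len(c1)):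
--         if c1[i] != c2[i]:
--             HD += 1
--     return HD
-- ===== SOURCE B (Python) =====
-- def HammingDistance(c1, c2):
--     HD = 0
--     for i in range(len(c1)):
--         if c1[i] != c2[i]:
--             HD += 1
--     return HD
--
-- def MDD(code, y):
--     # Single pass: keep the best distance seen so far and the codewords achieving it.
--     best = None
--     estimates = []
--     for codeword in code:
--         d = HammingDistance(codeword, y)
--         if best is None or d < best:
--             best = d
--             estimates = [codeword]
--         elif d == best:
--             estimates.append(codeword)
--     return estimates
-- ===== Notes on version B (the rewrite author's own statement) =====
-- stated objective: simpler
-- what changed: Replaces A's three passes (distance array, min(), index-filter loop) by one online pass that tracks the running minimum distance and the list of codewords achieving it.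
import Mathlib
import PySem

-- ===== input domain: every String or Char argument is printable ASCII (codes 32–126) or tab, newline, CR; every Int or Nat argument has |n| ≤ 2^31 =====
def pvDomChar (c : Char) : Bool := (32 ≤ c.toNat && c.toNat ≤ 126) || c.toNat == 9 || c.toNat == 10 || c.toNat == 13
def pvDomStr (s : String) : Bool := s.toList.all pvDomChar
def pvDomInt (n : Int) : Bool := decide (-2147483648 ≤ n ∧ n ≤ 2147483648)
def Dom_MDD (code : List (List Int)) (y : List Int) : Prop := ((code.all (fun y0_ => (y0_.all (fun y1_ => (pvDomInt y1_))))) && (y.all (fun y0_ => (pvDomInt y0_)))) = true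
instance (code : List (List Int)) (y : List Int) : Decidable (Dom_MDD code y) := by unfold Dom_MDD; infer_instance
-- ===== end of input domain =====

-- B replaces A's three passes (distance array, min, index-filter) by one online pass
-- tracking the running minimum distance and its codewords: simpler, same result.


-- ===== PORT A =====
-- shared helper (identical in Source A and Source B)
def HammingDistance (c1 c2 : List Int) : Int :=
  (PySem.List.pyRange 0 (c1.length : Int) 1).foldl
    (fun HD i =>
      if PySem.List.pyGet? c1 i ≠ PySem.List.pyGet? c2 i then HD + 1 else HD) 0

def MDD (code : List (List Int)) (y : List Int) : List (List Int) :=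
  let HDArray : List Int :=
    code.foldl (fun acc codeword => acc ++ [HammingDistance codeword y]) []
  -- min([]) raises ValueError in Python; that input is outside Pre_MDD
  let minHD : Int := (PySem.List.min? HDArray (fun v => v)).getD 0
  (PySem.List.pyRange 0 (code.length : Int) 1).foldl
    (fun acc i =>
      if PySem.List.pyGet? HDArray i = some minHD then
        acc ++ (PySem.List.pyGet? code i).toList
      else acc) []

-- ===== PORT B =====
def MDD_alt (code : List (List Int)) (y : List Int) : List (List Int) :=
  (code.foldl
    (fun (st : Option Int × List (List Int)) codeword =>
      let d := HammingDistance codeword y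
      match st with
      | (none, _) => (some d, [codeword])
      | (some m, r) =>
        if d < m then (some d, [codeword])
        else if d = m then (some m, r ++ [codeword])
        else (some m, r))
    (none, [])).2

-- ===== PRECONDITION & SPEC =====
-- Pre_ excludes empty code (Python's min([]) raises ValueError) and codewords longer
-- than y (HammingDistance then raises IndexError on y[i]); A returns on everything else.
def Pre_MDD (code : List (List Int)) (y : List Int) : Prop :=
  code ≠ [] ∧ ∀ c ∈ code, c.length ≤ y.length
instance (code : List (List Int)) (y : List Int) : Decidable (Pre_MDD code y) := by
  unfold Pre_MDD; infer_instance
def pvWitness_MDD : List (List Int) × List Int := ([[0, 1], [1, 1]], [1, 1])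

def Spec_MDD (code : List (List Int)) (y : List Int) (out : List (List Int)) : Prop := out = MDD_alt code y
instance (code : List (List Int)) (y : List Int) (out : List (List Int)) : Decidable (Spec_MDD code y out) := by unfold Spec_MDD; infer_instance

-- ===== CLAIM (what is proved, stated in full; the proofs are below) =====
def Claim_equal_MDD : Prop := ∀ (code : List (List Int)) (y : List Int), Dom_MDD code y → Pre_MDD code y → Spec_MDD code y (MDD code y)

-- ===== LEMMAS AND PROOFS =====

-- A's selection loop over indices collects exactly the codewords whose distance equals m.
theorem sel_loop (y : List Int) (m : Int) (code : List (List Int)) :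
    ∀ (ds : List Int), ds = code.map (fun c => HammingDistance c y) →
    ∀ acc : List (List Int),
    (PySem.List.pyRange 0 (code.length : Int) 1).foldl
      (fun acc i =>
        if PySem.List.pyGet? ds i = some m then
          acc ++ (PySem.List.pyGet? code i).toList
        else acc) acc
    = acc ++ code.filter (fun c => HammingDistance c y = m) := by
  induction code using List.reverseRecOn with
  | nil => rintro ds rfl acc; simp [PySem.List.pyRange_one_eq_nil]
  | append_singleton xs x ih =>
    rintro ds rfl acc
    have hlen : ((xs ++ [x]).length : Int) = (xs.length : Int) + 1 := by
      simp
    rw [hlen, PySem.List.pyRange_one_succ_right (by positivity), List.foldl_append]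
    have hcongr : ∀ (a : List (List Int)) (i : Int), i ∈ PySem.List.pyRange 0 (xs.length : Int) 1 →
        (if PySem.List.pyGet? ((xs ++ [x]).map (fun c => HammingDistance c y)) i = some m then
          a ++ (PySem.List.pyGet? (xs ++ [x]) i).toList else a)
      = (if PySem.List.pyGet? (xs.map (fun c => HammingDistance c y)) i = some m then
          a ++ (PySem.List.pyGet? xs i).toList else a) := by
      intro a i hi
      rw [PySem.List.mem_pyRange_one] at hi
      obtain ⟨h0, hlt⟩ := hi
      obtain ⟨k, rfl⟩ := Int.eq_ofNat_of_zero_le h0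
      have hk : k < xs.length := by exact_mod_cast hlt
      have e1 : PySem.List.pyGet? ((xs ++ [x]).map (fun c => HammingDistance c y)) (k : Int)
          = PySem.List.pyGet? (xs.map (fun c => HammingDistance c y)) (k : Int) := by
        rw [PySem.List.pyGet?_natCast, PySem.List.pyGet?_natCast, List.map_append,
            List.getElem?_append_left (by simpa using hk)]
      have e2 : PySem.List.pyGet? (xs ++ [x]) (k : Int) = PySem.List.pyGet? xs (k : Int) := by
        rw [PySem.List.pyGet?_natCast, PySem.List.pyGet?_natCast, List.getElem?_append_left hk]
      rw [e1, e2]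
    rw [PySem.List.foldl_congr_mem _ _ _ _ hcongr, ih _ rfl]
    simp only [List.filter_append]
    by_cases hm : HammingDistance x y = m
    · simp [hm]
    · simp [hm]

theorem foldl_min_le (y : List Int) (t : List (List Int)) :
    ∀ (a : Int), t.foldl (fun a c => min a (HammingDistance c y)) a ≤ a := by
  induction t with
  | nil => intro a; simp
  | cons u v ihv =>
    intro a
    simp only [List.foldl_cons]
    exact le_trans (ihv (min a (HammingDistance u y))) (min_le_left _ _)

-- B's fold with an already-set best value m and bucket r.
theorem alt_fold (y : List Int) (xs : List (List Int)) :
    ∀ (m : Int) (r : List (List Int)),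
    xs.foldl
      (fun (st : Option Int × List (List Int)) codeword =>
        let d := HammingDistance codeword y
        match st with
        | (none, _) => (some d, [codeword])
        | (some m, r) =>
          if d < m then (some d, [codeword])
          else if d = m then (some m, r ++ [codeword])
          else (some m, r))
      (some m, r)
    = (some (xs.foldl (fun a c => min a (HammingDistance c y)) m),
       (if xs.foldl (fun a c => min a (HammingDistance c y)) m = m then r else [])
         ++ xs.filter (fun c => HammingDistance c y
              = xs.foldl (fun a c => min a (HammingDistance c y)) m)) := by
  induction xs with
  | nil => intro m r; simp
  | cons c t ih =>
    intro m r
    have hMle : ∀ (a : Int), t.foldl (fun a c => min a (HammingDistance c y)) a ≤ a :=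
      foldl_min_le y t
    simp only [List.foldl_cons]
    by_cases h1 : HammingDistance c y < m
    · have hmin : min m (HammingDistance c y) = HammingDistance c y := by omega
      have hne : t.foldl (fun a c => min a (HammingDistance c y)) (HammingDistance c y) ≠ m := by
        have := hMle (HammingDistance c y); omega
      simp only [hmin, if_pos h1]
      rw [ih (HammingDistance c y) [c]]
      simp only [if_neg hne, List.filter_cons, List.nil_append]
      by_cases h2 : HammingDistance c y = t.foldl (fun a c => min a (HammingDistance c y)) (HammingDistance c y)
      · rw [if_pos h2.symm, if_pos (decide_eq_true h2)]
        simp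
      · simp only [h2, decide_false]
        by_cases h3 : t.foldl (fun a c => min a (HammingDistance c y)) (HammingDistance c y) = HammingDistance c y
        · exact absurd h3.symm h2
        · simp [h3]
    · by_cases h2 : HammingDistance c y = m
      · have hmin : min m (HammingDistance c y) = m := by omega
        simp only [hmin, if_neg h1, if_pos h2]
        rw [ih m (r ++ [c])]
        simp only [List.filter_cons]
        by_cases h3 : t.foldl (fun a c => min a (HammingDistance c y)) m = m
        · rw [h3]
          simp [h2, List.append_assoc]
        · have hne : ¬ (HammingDistance c y = t.foldl (fun a c => min a (HammingDistance c y)) m) := by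
            have := hMle m; omega
          simp [h3, hne]
      · have hmin : min m (HammingDistance c y) = m := by omega
        simp only [hmin, if_neg h1, if_neg h2]
        rw [ih m r]
        simp only [List.filter_cons]
        have hne : ¬ (HammingDistance c y = t.foldl (fun a c => min a (HammingDistance c y)) m) := by
          have := hMle m
          rcases lt_or_ge (HammingDistance c y) m with h | h
          · omega
          · intro he; have : t.foldl (fun a c => min a (HammingDistance c y)) m ≤ m := hMle m; omega
        simp [hne]

-- ===== VERDICT (by name: the statement is the Claim_ definition above) =====
theorem MDD_spec : Claim_equal_MDD := by
  intro code y _ hpre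
  unfold Spec_MDD
  obtain ⟨hne, -⟩ := hpre
  obtain ⟨c, t, rfl⟩ := List.exists_cons_of_ne_nil hne
  unfold MDD MDD_alt
  simp only [List.foldl_cons, PySem.List.foldl_append_singleton_eq_map, List.nil_append,
    List.cons_append, PySem.List.min?_id_cons, Option.getD_some, List.foldl_map]
  rw [alt_fold y t (HammingDistance c y) [c]]
  rw [sel_loop y (t.foldl (fun a c => min a (HammingDistance c y)) (HammingDistance c y)) (c :: t)
      (HammingDistance c y :: t.map (fun c => HammingDistance c y)) (by simp) []]
  simp only [List.nil_append, List.filter_cons]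
  have hle := foldl_min_le y t (HammingDistance c y)
  by_cases h : HammingDistance c y = t.foldl (fun a c => min a (HammingDistance c y)) (HammingDistance c y)
  · rw [if_pos (decide_eq_true h), if_pos h.symm]
    simp
  · rw [if_neg (by simpa using h), if_neg (fun e => h e.symm)]
    simp
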